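-- pv_equiv track=rewrite | github.com/M-Isaacson/winc-course | code/for/main.py | shortest_names
-- ===== SOURCE A (Python) =====
-- def shortest_names(country_list):
--     shortest_country_names = []
--     previous_len           = 10
--     for country in country_list:
--         if len(country) > previous_len:
--             continue
--         elif len(country) == previous_len:
--             shortest_country_names.append(country)
--         else:
--             shortest_country_names.clear()
--             shortest_country_names.append(country)
--             previous_len = len(country)
--     return shortest_country_names
-- ===== SOURCE B (Python) =====
-- def shortest_names(country_list):
--     target = 10
--     for country in country_list:
--         if len(country) < target:
--             target = len(country)
--     return [c for c in country_list if len(c) == target]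
-- ===== Notes on version B (the rewrite author's own statement) =====
-- stated objective: simpler
-- what changed: Replaces A's single clear-and-accumulate pass over a mutable result list with a min-finding pass (capped at 10) followed by a filter comprehension.
import Mathlib
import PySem

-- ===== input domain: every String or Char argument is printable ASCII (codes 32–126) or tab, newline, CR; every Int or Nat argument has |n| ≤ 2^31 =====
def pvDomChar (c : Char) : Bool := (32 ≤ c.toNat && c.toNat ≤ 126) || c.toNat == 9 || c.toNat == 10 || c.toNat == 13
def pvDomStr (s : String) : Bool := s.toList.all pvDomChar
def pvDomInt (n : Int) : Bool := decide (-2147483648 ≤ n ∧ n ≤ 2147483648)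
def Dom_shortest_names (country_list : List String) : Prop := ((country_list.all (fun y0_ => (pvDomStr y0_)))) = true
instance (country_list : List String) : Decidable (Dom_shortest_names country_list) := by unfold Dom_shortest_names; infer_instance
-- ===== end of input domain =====

-- B replaces A's clear-and-accumulate pass with a capped min-length pass followed by a filter (simpler decomposition).


-- ===== PORT A =====
-- fold state: (shortest_country_names, previous_len)
def shortest_names (country_list : List String) : List String :=
  (country_list.foldl
    (fun (s : List String × Nat) country =>
      if (PySem.Str.len country).toNat > s.2 then s
      else if (PySem.Str.len country).toNat = s.2 then (s.1 ++ [country], s.2)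
      else ([country], (PySem.Str.len country).toNat))
    ([], 10)).1

-- ===== PORT B =====
def shortest_names_alt (country_list : List String) : List String :=
  let target := country_list.foldl
    (fun (t : Nat) country => if (PySem.Str.len country).toNat < t then (PySem.Str.len country).toNat else t) 10
  country_list.filter (fun c => (PySem.Str.len c).toNat = target)

-- ===== PRECONDITION & SPEC =====
def Spec_shortest_names (country_list : List String) (out : List String) : Prop := out = shortest_names_alt country_list
instance (country_list : List String) (out : List String) : Decidable (Spec_shortest_names country_list out) := by unfold Spec_shortest_names; infer_instance

-- ===== CLAIM (what is proved, stated in full; the proofs are below) =====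
def Claim_equal_shortest_names : Prop := ∀ (country_list : List String), Dom_shortest_names country_list → Spec_shortest_names country_list (shortest_names country_list)

-- ===== LEMMAS AND PROOFS =====

def pvStepA (s : List String × Nat) (country : String) : List String × Nat :=
  if (PySem.Str.len country).toNat > s.2 then s
  else if (PySem.Str.len country).toNat = s.2 then (s.1 ++ [country], s.2)
  else ([country], (PySem.Str.len country).toNat)

def pvStepB (t : Nat) (country : String) : Nat :=
  if (PySem.Str.len country).toNat < t then (PySem.Str.len country).toNat else t

lemma pvLen (c : String) : (PySem.Str.len c).toNat = c.length := by
  simp [PySem.Str.len]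

lemma pvFoldB_le (l : List String) (t : Nat) : l.foldl pvStepB t ≤ t := by
  induction l generalizing t with
  | nil => simp
  | cons c l ih =>
    simp only [List.foldl_cons]
    refine le_trans (ih _) ?_
    unfold pvStepB
    split_ifs with h <;> omega

lemma pvLoop (l : List String) (t : Nat) (acc : List String) :
    (l.foldl pvStepA (acc, t)).1 =
      (if l.foldl pvStepB t = t then acc else []) ++
        l.filter (fun c => (PySem.Str.len c).toNat = l.foldl pvStepB t) := by
  induction l generalizing t acc with
  | nil => simp
  | cons c l ih =>
    simp only [List.foldl_cons, List.filter_cons]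
    by_cases h1 : (PySem.Str.len c).toNat > t
    · -- skip
      have hstepA : pvStepA (acc, t) c = (acc, t) := by unfold pvStepA; rw [if_pos h1]
      have hstepB : pvStepB t c = t := by unfold pvStepB; split_ifs with h <;> omega
      rw [hstepA]; simp only [hstepB]; rw [ih]
      have hle := pvFoldB_le l t
      have hne : ¬ ((PySem.Str.len c).toNat = l.foldl pvStepB t) := by omega
      rw [pvLen] at hne
      simp [hne]
    · by_cases h2 : (PySem.Str.len c).toNat = t
      · -- append
        have hstepA : pvStepA (acc, t) c = (acc ++ [c], t) := by
          unfold pvStepA; rw [if_neg h1, if_pos h2]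
        have hstepB : pvStepB t c = t := by unfold pvStepB; split_ifs with h <;> omega
        rw [hstepA]; simp only [hstepB]; rw [ih]
        by_cases h3 : l.foldl pvStepB t = t
        · rw [pvLen] at h2
          simp [h3, h2, List.append_assoc]
        · have hle := pvFoldB_le l t
          have hne : ¬ ((PySem.Str.len c).toNat = l.foldl pvStepB t) := by omega
          rw [pvLen] at hne
          simp [h3, hne]
      · -- clear and restart
        have h1' : (PySem.Str.len c).toNat < t := by omega
        have hstepA : pvStepA (acc, t) c = ([c], (PySem.Str.len c).toNat) := by
          unfold pvStepA; rw [if_neg h1, if_neg h2]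
        have hstepB : pvStepB t c = (PySem.Str.len c).toNat := by unfold pvStepB; rw [if_pos h1']
        rw [hstepA]; simp only [hstepB]; rw [ih]
        have hle := pvFoldB_le l (PySem.Str.len c).toNat
        have hne : ¬ (l.foldl pvStepB (PySem.Str.len c).toNat = t) := by omega
        rw [pvLen] at hne hle ⊢
        simp only [hne, if_false]
        by_cases h4 : l.foldl pvStepB c.length = c.length
        · simp [h4]
        · have hne2 : ¬ (c.length = l.foldl pvStepB c.length) := by omega
          simp [h4, hne2]

-- ===== VERDICT (by name: the statement is the Claim_ definition above) =====
theorem shortest_names_spec : Claim_equal_shortest_names := by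
  intro l _
  show shortest_names l = shortest_names_alt l
  have hA : shortest_names l = (l.foldl pvStepA ([], 10)).1 := rfl
  have hB : shortest_names_alt l =
      l.filter (fun c => (PySem.Str.len c).toNat = l.foldl pvStepB 10) := rfl
  rw [hA, hB, pvLoop]
  split_ifs <;> simp
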